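-- pv_equiv track=rewrite | github.com/stochastic-sisyphus/text-feature-span-extractor | src/invoices/candidates/patterns.py | has_repetitive_text
-- ===== SOURCE A (Python) =====
-- def has_repetitive_text(text: str) -> bool:
--     """Check if text has >50% repeated words (garbage indicator).
--
--     Detects patterns like: "1 1 1 1 1 1 1 1" which are garbage candidates.
--     """
--     words = text.strip().split()
--     if len(words) <= 1:
--         return False
--
--     # Count word frequencies
--     word_counts: dict[str, int] = {}
--     for word in words:
--         word_lower = word.lower()
--         word_counts[word_lower] = word_counts.get(word_lower, 0) + 1
--
--     # Find most frequent word
--     max_count = max(word_counts.values())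
--
--     # If most frequent word appears in >50% of positions, it's repetitive
--     if max_count / len(words) > 0.5:
--         return True
--
--     return False
-- ===== SOURCE B (Python) =====
-- def has_repetitive_text(text: str) -> bool:
--     """Boyer-Moore majority vote instead of building a frequency dict."""
--     words = [w.lower() for w in text.strip().split()]
--     if len(words) <= 1:
--         return False
--     cand, cnt = None, 0
--     for w in words:
--         if cnt == 0:
--             cand, cnt = w, 1
--         elif w == cand:
--             cnt += 1
--         else:
--             cnt -= 1
--     occurrences = sum(1 for w in words if w == cand)
--     return 2 * occurrences > len(words)
-- ===== Notes on version B (the rewrite author's own statement) =====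
-- stated objective: alternative
-- what changed: B replaces A's frequency dictionary and max-of-values scan by a Boyer-Moore majority vote over the lowercased words followed by a single recount of the candidate, using O(1) extra space instead of a dict.
import Mathlib
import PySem

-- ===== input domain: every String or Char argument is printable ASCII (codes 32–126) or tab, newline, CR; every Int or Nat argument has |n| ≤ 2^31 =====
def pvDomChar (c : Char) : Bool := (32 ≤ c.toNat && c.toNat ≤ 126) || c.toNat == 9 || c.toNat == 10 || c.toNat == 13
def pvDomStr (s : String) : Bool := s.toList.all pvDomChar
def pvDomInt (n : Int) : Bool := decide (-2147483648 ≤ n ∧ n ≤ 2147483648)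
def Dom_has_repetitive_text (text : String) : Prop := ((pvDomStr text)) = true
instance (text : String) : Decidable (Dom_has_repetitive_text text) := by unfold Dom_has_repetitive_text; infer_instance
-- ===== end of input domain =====

-- B replaces A's frequency dictionary + max-of-values scan by a Boyer-Moore majority vote
-- over the lowercased words with a recount of the candidate (alternative one-candidate algorithm).


-- ===== PORT A =====
def has_repetitive_text (text : String) : Bool :=
  let words := PySem.Str.split₀ (PySem.Str.strip text)
  if words.length ≤ 1 then false
  else
    let word_counts := words.foldl
      (fun d w => d.insert (PySem.Str.lower w) (d.getD (PySem.Str.lower w) 0 + 1))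
      (PySem.Dict.empty : PySem.Dict String Int)
    -- max(word_counts.values()); the none branch is unreachable here (words ≠ [] so the dict is nonempty)
    match PySem.List.max? word_counts.values (fun v => v) with
    | some max_count =>
        -- max_count / len(words) > 0.5 ported as the exact integer comparison 2*max_count > n
        -- (exact: both are word counts of an in-memory string, far below 2^52)
        decide ((2 : Int) * max_count > (words.length : Int))
    | none => false

-- ===== PORT B =====
-- one vote step on (candidate, count); Python's initial cand=None is never compared
-- (cnt starts at 0, so the first word overwrites it), hence "" as the dummy initial candidate
def pvBmStep (st : String × Int) (w : String) : String × Int :=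
  if st.2 = 0 then (w, 1)
  else if w = st.1 then (st.1, st.2 + 1)
  else (st.1, st.2 - 1)

def has_repetitive_text_alt (text : String) : Bool :=
  let words := (PySem.Str.split₀ (PySem.Str.strip text)).map PySem.Str.lower
  if words.length ≤ 1 then false
  else
    let cand := (words.foldl pvBmStep ("", 0)).1
    -- recount the candidate: 2 * occurrences > len(words)
    decide (2 * (words.count cand : Int) > (words.length : Int))

-- ===== PRECONDITION & SPEC =====
def Spec_has_repetitive_text (text : String) (out : Bool) : Prop := out = has_repetitive_text_alt text
instance (text : String) (out : Bool) : Decidable (Spec_has_repetitive_text text out) := by unfold Spec_has_repetitive_text; infer_instance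

-- ===== CLAIM (what is proved, stated in full; the proofs are below) =====
def Claim_equal_has_repetitive_text : Prop := ∀ (text : String), Dom_has_repetitive_text text → Spec_has_repetitive_text text (has_repetitive_text text)

-- ===== LEMMAS AND PROOFS =====

-- Boyer-Moore invariant: the vote count k is nonnegative, the candidate's true count is at most
-- (length + k)/2, and every other word's true count is at most (length - k)/2.
theorem pvBm_inv (l : List String) :
    0 ≤ (l.foldl pvBmStep ("", 0)).2 ∧
    2 * (l.count (l.foldl pvBmStep ("", 0)).1 : Int)
      ≤ (l.length : Int) + (l.foldl pvBmStep ("", 0)).2 ∧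
    ∀ x : String, x ≠ (l.foldl pvBmStep ("", 0)).1 →
      2 * (l.count x : Int) ≤ (l.length : Int) - (l.foldl pvBmStep ("", 0)).2 := by
  induction l using List.reverseRecOn with
  | nil => simp
  | append_singleton l w ih =>
      rw [List.foldl_append]
      set s := List.foldl pvBmStep ("", 0) l with hs
      obtain ⟨hk, hc, hrest⟩ := ih
      simp only [List.foldl_cons, List.foldl_nil, pvBmStep]
      split_ifs with h0 hw
      · have hw2 : 2 * ((l.count w : Int)) ≤ (l.length : Int) := by
          by_cases hwc : w = s.1
          · rw [hwc]; omega
          · have := hrest w hwc; omega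
        refine ⟨by omega, ?_, ?_⟩
        · simp only [List.count_append, List.count_singleton, List.length_append,
            List.length_singleton]
          push_cast; omega
        · intro x hx
          have hxl : 2 * ((l.count x : Int)) ≤ (l.length : Int) := by
            by_cases hxc : x = s.1
            · rw [hxc]; omega
            · have := hrest x hxc; omega
          simp only [List.count_append, List.count_singleton', List.length_append,
            List.length_singleton, if_neg (Ne.symm hx)]
          push_cast; omega
      · subst hw
        refine ⟨by omega, ?_, ?_⟩
        · simp only [List.count_append, List.count_singleton, List.length_append,
            List.length_singleton]
          push_cast; omega
        · intro x hx
          have := hrest x hx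
          simp only [List.count_append, List.count_singleton', List.length_append,
            List.length_singleton, if_neg (Ne.symm hx)]
          push_cast; omega
      · refine ⟨by omega, ?_, ?_⟩
        · simp only [List.count_append, List.count_singleton', List.length_append,
            List.length_singleton, if_neg hw]
          push_cast; omega
        · intro x hx
          by_cases hxw : x = w
          · subst hxw
            have := hrest x hx
            simp only [List.count_append, List.count_singleton, List.length_append,
              List.length_singleton]
            push_cast; omega
          · have := hrest x hx
            simp only [List.count_append, List.count_singleton', List.length_append,
              List.length_singleton, if_neg (Ne.symm hxw)]
            push_cast; omega

-- any word occurring in a strict majority of positions is the Boyer-Moore candidate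
theorem pvBm_majority (l : List String) (x : String)
    (h : 2 * (l.count x : Int) > (l.length : Int)) :
    x = (l.foldl pvBmStep ("", 0)).1 := by
  by_contra hne
  obtain ⟨hk, -, hrest⟩ := pvBm_inv l
  have := hrest x hne
  omega

-- ===== VERDICT (by name: the statement is the Claim_ definition above) =====
theorem has_repetitive_text_spec : Claim_equal_has_repetitive_text := by
  intro text _
  unfold Spec_has_repetitive_text has_repetitive_text has_repetitive_text_alt
  dsimp only
  set ws := PySem.Str.split₀ (PySem.Str.strip text) with hws
  set lw := ws.map PySem.Str.lower with hlw
  have hlen : lw.length = ws.length := List.length_map ..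
  rw [← hlen]
  by_cases hle : lw.length ≤ 1
  · rw [if_pos hle, if_pos hle]
  · rw [if_neg hle, if_neg hle]
    -- A's word_counts dict is Counter(lw)
    have hdict : ws.foldl
        (fun d w => d.insert (PySem.Str.lower w) (d.getD (PySem.Str.lower w) 0 + 1))
        (PySem.Dict.empty : PySem.Dict String Int) = PySem.Dict.counter lw := by
      rw [hlw, ← PySem.Dict.foldl_insert_getD_add_one_eq_counter, List.foldl_map]
    rw [hdict]
    -- its values are the true counts of the distinct words
    have hvals : (PySem.Dict.counter lw).values
        = (PySem.Set.ofList lw).map (fun k => (lw.count k : Int)) := by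
      show ((PySem.Dict.counter lw).items).map (·.2) = _
      rw [PySem.Dict.items_counter, List.map_map]
      rfl
    have hne : lw ≠ [] := by
      intro h; rw [h] at hle; simp at hle
    obtain ⟨w0, hw0⟩ : ∃ w0, w0 ∈ lw := List.exists_mem_of_ne_nil lw hne
    have hvne : (PySem.Dict.counter lw).values ≠ [] := by
      rw [hvals]
      exact List.ne_nil_of_mem (List.mem_map_of_mem ((PySem.Set.mem_ofList _ _).2 hw0))
    obtain ⟨m, hm⟩ : ∃ m, PySem.List.max? (PySem.Dict.counter lw).values (fun v => v) = some m := by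
      cases hmax : PySem.List.max? (PySem.Dict.counter lw).values (fun v => v) with
      | none => exact absurd ((PySem.List.max?_eq_none_iff _ _).mp hmax) hvne
      | some m => exact ⟨m, rfl⟩
    rw [hm]
    -- max_count is the count of some word, and bounds every word's count
    obtain ⟨k, hkmem, hkm⟩ : ∃ k, k ∈ lw ∧ (lw.count k : Int) = m := by
      have hmem := PySem.List.max?_mem hm
      rw [hvals] at hmem
      obtain ⟨k, hk, hkm⟩ := List.mem_map.mp hmem
      exact ⟨k, (PySem.Set.mem_ofList _ _).1 hk, hkm⟩
    have hmax : ∀ y ∈ lw, (lw.count y : Int) ≤ m := by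
      intro y hy
      exact PySem.List.max?_isMax hm (lw.count y : Int)
        (by rw [hvals]; exact List.mem_map_of_mem ((PySem.Set.mem_ofList _ _).2 hy))
    set cand := (lw.foldl pvBmStep ("", 0)).1 with hcand
    have hn : 2 ≤ lw.length := by omega
    rw [decide_eq_decide]
    constructor
    · intro hA
      have hkc : k = cand := pvBm_majority lw k (by omega)
      rw [← hkc]; omega
    · intro hB
      by_cases hc : cand ∈ lw
      · have := hmax cand hc; omega
      · rw [List.count_eq_zero_of_not_mem hc] at hB
        push_cast at hB
        omega
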